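-- pv_equiv track=rewrite | github.com/mortyc126-debug/rayon | tension/rasloyenie.py | measure_layer
-- ===== SOURCE A (Python) =====
-- M4 = 0xF
--
-- IV4 = [0x6,0xB,0x3,0xA,0x5,0x9,0x1,0x5]
--
-- K4 = [0x4,0x7,0xB,0xE,0x3,0x5,0x9,0xA,0xD,0x1,0x2,0x5,0x7,0x8,0x9,0xC]
--
-- def sha4(W, nr=64):
--     Ws = list(W[:16])
--     while len(Ws)<16: Ws.append(0)
--     for i in range(16, max(nr,16)):
--         Ws.append((Ws[i-2]^Ws[i-7]^Ws[i-15]^Ws[i-16])&M4)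
--     a,b,c,d,e,f,g,h = IV4
--     for r in range(nr):
--         ch=(e&f)^(~e&g)&M4; t1=(h+ch+K4[r%16]+Ws[r%len(Ws)])&M4
--         maj=(a&b)^(a&c)^(b&c); t2=(a^maj)&M4
--         h,g,f,e=g,f,e,(d+t1)&M4; d,c,b,a=c,b,a,(t1+t2)&M4
--     return tuple((IV4[i]+x)&M4 for i,x in enumerate([a,b,c,d,e,f,g,h]))
--
-- def measure_stable_bits(W_base, vary_word, n_rounds=64):
--     """Which output bits are STABLE when varying one W word?"""
--     hashes = []
--     for val in range(16):
--         W = list(W_base)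
--         W[vary_word] = val
--         hashes.append(sha4(W, n_rounds))
--
--     stable = []
--     for bit_pos in range(32):
--         word, bit = bit_pos // 4, bit_pos % 4
--         values = set((h[word] >> bit) & 1 for h in hashes)
--         if len(values) == 1:
--             stable.append(bit_pos)
--     return set(stable)
--
-- def measure_layer(W_base, vary_words, n_rounds=64):
--     """Which bits are stable when varying MULTIPLE W words simultaneously?"""
--     # For each varied word: get stable bits
--     # Intersection = bits stable for ALL varied words
--     all_stable = None
--     for w_idx in vary_words:
--         s = measure_stable_bits(W_base, w_idx, n_rounds)
--         if all_stable is None: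
--             all_stable = s
--         else:
--             all_stable &= s
--     return all_stable if all_stable else set()
-- ===== SOURCE B (Python) =====
-- M4 = 0xF
--
-- IV4 = [0x6,0xB,0x3,0xA,0x5,0x9,0x1,0x5]
--
-- K4 = [0x4,0x7,0xB,0xE,0x3,0x5,0x9,0xA,0xD,0x1,0x2,0x5,0x7,0x8,0x9,0xC]
--
-- def sha4(W, nr=64):
--     Ws = list(W[:16])
--     while len(Ws)<16: Ws.append(0)
--     for i in range(16, max(nr,16)):
--         Ws.append((Ws[i-2]^Ws[i-7]^Ws[i-15]^Ws[i-16])&M4)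
--     a,b,c,d,e,f,g,h = IV4
--     for r in range(nr):
--         ch=(e&f)^(~e&g)&M4; t1=(h+ch+K4[r%16]+Ws[r%len(Ws)])&M4
--         maj=(a&b)^(a&c)^(b&c); t2=(a^maj)&M4
--         h,g,f,e=g,f,e,(d+t1)&M4; d,c,b,a=c,b,a,(t1+t2)&M4
--     return tuple((IV4[i]+x)&M4 for i,x in enumerate([a,b,c,d,e,f,g,h]))
--
-- def bit_of(h, bit_pos):
--     return (h[bit_pos // 4] >> (bit_pos % 4)) & 1
--
-- def measure_layer(W_base, vary_words, n_rounds=64):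
--     """Stable bits via De Morgan: collect every bit that VARIES for some varied
--     word (relative to a reference hash) and return the complement of that union."""
--     if not vary_words:
--         return set()
--     varying = set()
--     for w in vary_words:
--         hashes = []
--         for val in range(16):
--             W = list(W_base)
--             W[w] = val
--             hashes.append(sha4(W, n_rounds))
--         ref = hashes[0]
--         for h in hashes[1:]:
--             for bit_pos in range(32):
--                 if bit_of(h, bit_pos) != bit_of(ref, bit_pos):
--                     varying.add(bit_pos)
--     return set(range(32)) - varying
-- ===== Notes on version B (the rewrite author's own statement) =====
-- stated objective: alternative
-- what changed: Instead of computing a per-word set of stable bits and intersecting these sets, B accumulates a single union of bit positions that vary (each of the 16 hashes compared against the first one) and returns set(range(32)) minus that union (De Morgan); sha4 is kept unchanged.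
import Mathlib
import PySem

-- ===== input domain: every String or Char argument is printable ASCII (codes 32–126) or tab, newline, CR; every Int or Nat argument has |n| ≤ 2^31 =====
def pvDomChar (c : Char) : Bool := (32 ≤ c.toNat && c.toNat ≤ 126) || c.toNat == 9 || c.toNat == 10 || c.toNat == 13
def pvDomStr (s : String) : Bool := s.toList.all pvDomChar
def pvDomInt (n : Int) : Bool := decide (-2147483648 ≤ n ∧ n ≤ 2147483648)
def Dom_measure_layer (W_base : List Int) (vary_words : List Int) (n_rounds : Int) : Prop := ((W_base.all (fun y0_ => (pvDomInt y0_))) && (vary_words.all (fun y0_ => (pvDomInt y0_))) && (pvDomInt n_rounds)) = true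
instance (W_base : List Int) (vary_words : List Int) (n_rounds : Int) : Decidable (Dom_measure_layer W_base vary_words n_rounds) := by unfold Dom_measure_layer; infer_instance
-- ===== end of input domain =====

-- B changes the aggregation, not the hash: instead of building a per-word set of
-- stable bits and intersecting, it accumulates one union of VARYING bits (each
-- hash compared against the first) and returns the complement of that union
-- ('alternative' objective; sha4 itself is kept as-is).

-- ===== PORT A =====
-- shared module constants
def IV4L : List Int := [6, 11, 3, 10, 5, 9, 1, 5]
def K4L : List Int := [4, 7, 11, 14, 3, 5, 9, 10, 13, 1, 2, 5, 7, 8, 9, 12]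

-- port of sha4 (helper used by both programs); the Python tuple result is kept as a list
def sha4 (W : List Int) (nr : Int) : List Int :=
  let Ws0 := PySem.List.slice W none (some 16)
  -- while len(Ws) < 16: Ws.append(0)
  let Ws1 := Ws0 ++ List.replicate (16 - Ws0.length) 0
  let Ws := (PySem.List.pyRange 16 (max nr 16) 1).foldl
    (fun ws i =>
      ws ++ [PySem.Int.band
        (PySem.Int.bxor (PySem.Int.bxor (PySem.Int.bxor
          (PySem.List.pyGetD ws (i - 2) 0) (PySem.List.pyGetD ws (i - 7) 0))
          (PySem.List.pyGetD ws (i - 15) 0)) (PySem.List.pyGetD ws (i - 16) 0)) 15]) Ws1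
  let st := (PySem.List.pyRange 0 nr 1).foldl
    (fun (s : Int × Int × Int × Int × Int × Int × Int × Int) r =>
      match s with
      | (a, b, c, d, e, f, g, h) =>
        let ch := PySem.Int.bxor (PySem.Int.band e f)
          (PySem.Int.band (PySem.Int.band (Int.not e) g) 15)
        let t1 := PySem.Int.band
          (h + ch + PySem.List.pyGetD K4L (PySem.Int.mod r 16) 0
             + PySem.List.pyGetD Ws (PySem.Int.mod r (Ws.length : Int)) 0) 15
        let maj := PySem.Int.bxor (PySem.Int.bxor (PySem.Int.band a b) (PySem.Int.band a c))
          (PySem.Int.band b c)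
        let t2 := PySem.Int.band (PySem.Int.bxor a maj) 15
        (PySem.Int.band (t1 + t2) 15, a, b, c, PySem.Int.band (d + t1) 15, e, f, g))
    (6, 11, 3, 10, 5, 9, 1, 5)
  match st with
  | (a, b, c, d, e, f, g, h) =>
    (PySem.List.enumerate [a, b, c, d, e, f, g, h] 0).map
      (fun p => PySem.Int.band (PySem.List.pyGetD IV4L p.1 0 + p.2) 15)

-- port of measure_stable_bits
def measure_stable_bits (W_base : List Int) (vary_word : Int) (n_rounds : Int) : List Int :=
  let hashes := (PySem.List.pyRange 0 16 1).foldl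
    (fun acc val => acc ++ [sha4 (PySem.List.pySetD W_base vary_word val) n_rounds]) []
  let stable := (PySem.List.pyRange 0 32 1).foldl
    (fun acc bit_pos =>
      let word := PySem.Int.floordiv bit_pos 4
      let bit := PySem.Int.mod bit_pos 4
      let values := PySem.Set.ofList
        (hashes.map (fun (h : List Int) => PySem.Int.band (PySem.List.pyGetD h word 0 >>> bit.toNat) 1))
      if PySem.Set.len values == 1 then acc ++ [bit_pos] else acc) []
  PySem.Set.ofList stable

def measure_layer (W_base : List Int) (vary_words : List Int) (n_rounds : Int) : List Int :=
  let all_stable := vary_words.foldl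
    (fun (acc : Option (List Int)) w_idx =>
      let s := measure_stable_bits W_base w_idx n_rounds
      match acc with
      | none => some s
      | some a => some (PySem.Set.inter a s)) none
  match all_stable with
  | none => []
  | some a => if a = [] then [] else a

-- ===== PORT B =====
def bit_of (h : List Int) (bit_pos : Int) : Int :=
  PySem.Int.band (PySem.List.pyGetD h (PySem.Int.floordiv bit_pos 4) 0
      >>> (PySem.Int.mod bit_pos 4).toNat) 1

def measure_layer_alt (W_base : List Int) (vary_words : List Int) (n_rounds : Int) : List Int :=
  if vary_words = [] then []
  else
    let varying := vary_words.foldl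
      (fun (vy : PySem.Set Int) w =>
        let hashes := (PySem.List.pyRange 0 16 1).foldl
          (fun acc val => acc ++ [sha4 (PySem.List.pySetD W_base w val) n_rounds]) []
        let ref := PySem.List.pyGetD hashes 0 []
        (PySem.List.slice hashes (some 1) none).foldl
          (fun vy h =>
            (PySem.List.pyRange 0 32 1).foldl
              (fun vy bit_pos =>
                if bit_of h bit_pos != bit_of ref bit_pos then PySem.Set.add vy bit_pos else vy)
              vy)
          vy) []
    PySem.Set.diff (PySem.Set.ofList (PySem.List.pyRange 0 32 1)) varying

-- ===== PRECONDITION & SPEC =====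
-- Pre_ excludes exactly the inputs where Python raises: 'W[vary_word] = val'
-- is an IndexError when some w in vary_words is not a valid index of W_base.
def Pre_measure_layer (W_base : List Int) (vary_words : List Int) (n_rounds : Int) : Prop :=
  ∀ w ∈ vary_words, PySem.Raise.InRange W_base.length w
instance (W_base : List Int) (vary_words : List Int) (n_rounds : Int) : Decidable (Pre_measure_layer W_base vary_words n_rounds) := by unfold Pre_measure_layer; infer_instance

def pvWitness_measure_layer : List Int × List Int × Int := ([3, 1, 4, 1, 5], [0, 2, -1], 8)

def Spec_measure_layer (W_base : List Int) (vary_words : List Int) (n_rounds : Int) (out : List Int) : Prop := out = measure_layer_alt W_base vary_words n_rounds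
instance (W_base : List Int) (vary_words : List Int) (n_rounds : Int) (out : List Int) : Decidable (Spec_measure_layer W_base vary_words n_rounds out) := by unfold Spec_measure_layer; infer_instance

-- ===== CLAIM (what is proved, stated in full; the proofs are below) =====
def Claim_equal_measure_layer : Prop := ∀ (W_base : List Int) (vary_words : List Int) (n_rounds : Int), Dom_measure_layer W_base vary_words n_rounds → Pre_measure_layer W_base vary_words n_rounds → Spec_measure_layer W_base vary_words n_rounds (measure_layer W_base vary_words n_rounds)

-- ===== LEMMAS AND PROOFS =====

-- the 16 hashes built for one varied word (the identical loop appears in both ports)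
def hashesFor (W_base : List Int) (n_rounds : Int) (w : Int) : List (List Int) :=
  (PySem.List.pyRange 0 16 1).foldl
    (fun acc val => acc ++ [sha4 (PySem.List.pySetD W_base w val) n_rounds]) []

-- A's per-word, per-bit stability test, as a Bool predicate
def stabB (W_base : List Int) (n_rounds : Int) (w : Int) (bp : Int) : Bool :=
  PySem.Set.len (PySem.Set.ofList ((hashesFor W_base n_rounds w).map (fun h => bit_of h bp))) == 1

theorem hashesFor_eq_map (W_base : List Int) (n_rounds : Int) (w : Int) :
    hashesFor W_base n_rounds w
      = sha4 (PySem.List.pySetD W_base w 0) n_rounds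
        :: (PySem.List.pyRange 1 16 1).map (fun val => sha4 (PySem.List.pySetD W_base w val) n_rounds) := by
  unfold hashesFor
  rw [PySem.List.foldl_append_singleton_eq_map, List.nil_append,
    PySem.List.pyRange_one_cons (by norm_num), List.map_cons]
  norm_num

theorem set_len_one_iff {x : Int} {t : List Int} :
    (PySem.Set.len (PySem.Set.ofList (x :: t)) == 1) = true ↔ ∀ y ∈ t, y = x := by
  rw [PySem.Set.ofList_cons]
  simp only [PySem.Set.len, List.length_cons, beq_iff_eq]
  constructor
  · intro h y hy
    have hnil : ((PySem.Set.ofList t).discard x).length = 0 := by omega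
    rw [List.length_eq_zero_iff] at hnil
    by_contra hne
    have : y ∈ (PySem.Set.ofList t).discard x := by
      rw [PySem.Set.mem_discard]
      exact ⟨(PySem.Set.mem_ofList t y).2 hy, hne⟩
    rw [hnil] at this
    simp at this
  · intro h
    have hnil : (PySem.Set.ofList t).discard x = [] := by
      rw [List.eq_nil_iff_forall_not_mem]
      intro y hy
      rw [PySem.Set.mem_discard] at hy
      exact hy.2 (h y ((PySem.Set.mem_ofList t y).1 hy.1))
    rw [hnil]
    simp

-- A's stability test ↔ every non-reference hash agrees with the reference on bit bp
theorem stabB_iff (W_base : List Int) (n_rounds : Int) (w bp : Int) :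
    stabB W_base n_rounds w bp = true
      ↔ ∀ h ∈ (hashesFor W_base n_rounds w).tail,
          bit_of h bp = bit_of (PySem.List.pyGetD (hashesFor W_base n_rounds w) 0 []) bp := by
  rw [hashesFor_eq_map]
  unfold stabB
  rw [hashesFor_eq_map, List.map_cons, set_len_one_iff]
  simp only [List.tail_cons, PySem.List.pyGetD_zero_cons, List.forall_mem_map]

-- the stability test as it appears literally in port A
theorem stabB_spec (W_base : List Int) (n_rounds w bp : Int) :
    (PySem.Set.len (PySem.Set.ofList
        (((PySem.List.pyRange 0 16 1).foldl
            (fun acc val => acc ++ [sha4 (PySem.List.pySetD W_base w val) n_rounds]) []).map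
          (fun (h : List Int) => PySem.Int.band
            (PySem.List.pyGetD h (PySem.Int.floordiv bp 4) 0 >>> (PySem.Int.mod bp 4).toNat) 1))) == 1)
    = stabB W_base n_rounds w bp := rfl

-- measure_stable_bits is a filter of range(32) by stabB
theorem msb_eq_filter (W_base : List Int) (w n_rounds : Int) :
    measure_stable_bits W_base w n_rounds
      = (PySem.List.pyRange 0 32 1).filter (stabB W_base n_rounds w) := by
  unfold measure_stable_bits
  simp only [stabB_spec]
  show PySem.Set.ofList ((PySem.List.pyRange 0 32 1).foldl
      (fun acc x => if stabB W_base n_rounds w x = true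
        then acc ++ [(fun (y : Int) => y) x] else acc) [])
    = List.filter (stabB W_base n_rounds w) (PySem.List.pyRange 0 32 1)
  rw [PySem.List.foldl_append_if (stabB W_base n_rounds w) (fun y => y)]
  rw [List.nil_append, List.map_id']
  exact PySem.Set.ofList_eq_self_of_nodup _
    ((PySem.List.nodup_pyRange_one 0 32).filter _)

-- Set.inter of two filters of the same Nodup list is the filter by the conjunction
theorem inter_filter_filter (l : List Int) (P Q : Int → Bool) :
    PySem.Set.inter (l.filter P) (l.filter Q) = l.filter (fun x => P x && Q x) := by
  show List.filter (fun x => (l.filter Q).contains x) (l.filter P) = _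
  rw [List.filter_filter]
  apply List.filter_congr
  intro x hx
  simp [hx, Bool.and_comm]

-- A's intersection fold, characterised
theorem interfold (W_base : List Int) (n_rounds : Int) (rest : List Int) (P : Int → Bool) :
    rest.foldl
      (fun (acc : Option (List Int)) w_idx =>
        let s := measure_stable_bits W_base w_idx n_rounds
        match acc with
        | none => some s
        | some a => some (PySem.Set.inter a s))
      (some ((PySem.List.pyRange 0 32 1).filter P))
    = some ((PySem.List.pyRange 0 32 1).filter
        (fun bp => P bp && rest.all (fun w => stabB W_base n_rounds w bp))) := by
  induction rest generalizing P with
  | nil => simp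
  | cons w t ih =>
    simp only [List.foldl_cons]
    rw [msb_eq_filter, inter_filter_filter, ih]
    congr 1
    apply List.filter_congr
    intro x _
    simp [Bool.and_assoc]

-- generic: membership in an 'add if p' fold
theorem mem_foldl_add_if (p : Int → Bool) (l : List Int) (s : PySem.Set Int) (y : Int) :
    y ∈ l.foldl (fun s x => if p x then PySem.Set.add s x else s) s
      ↔ y ∈ s ∨ (y ∈ l ∧ p y = true) := by
  induction l generalizing s with
  | nil => simp
  | cons x t ih =>
    simp only [List.foldl_cons]
    by_cases hp : p x
    · rw [if_pos hp, ih]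
      simp only [PySem.Set.mem_add, List.mem_cons]
      constructor
      · rintro ((h | rfl) | h)
        · exact Or.inl h
        · exact Or.inr ⟨Or.inl rfl, hp⟩
        · exact Or.inr ⟨Or.inr h.1, h.2⟩
      · rintro (h | ⟨(rfl | h), hpy⟩)
        · exact Or.inl (Or.inl h)
        · exact Or.inl (Or.inr rfl)
        · exact Or.inr ⟨h, hpy⟩
    · rw [if_neg hp, ih]
      simp only [List.mem_cons]
      constructor
      · rintro (h | h)
        · exact Or.inl h
        · exact Or.inr ⟨Or.inr h.1, h.2⟩
      · rintro (h | ⟨(rfl | h), hpy⟩)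
        · exact Or.inl h
        · exact absurd hpy hp
        · exact Or.inr ⟨h, hpy⟩

-- generic: membership in a fold whose step satisfies a membership law
theorem mem_foldl_of_step {α : Type} (f : PySem.Set Int → α → PySem.Set Int)
    (C : α → Int → Prop) (y : Int)
    (hf : ∀ s h, y ∈ f s h ↔ y ∈ s ∨ C h y) (l : List α) (s : PySem.Set Int) :
    y ∈ l.foldl f s ↔ y ∈ s ∨ ∃ h ∈ l, C h y := by
  induction l generalizing s with
  | nil => simp
  | cons x t ih =>
    simp only [List.foldl_cons]
    rw [ih, hf]
    simp only [List.mem_cons]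
    constructor
    · rintro ((h | h) | ⟨z, hz, hc⟩)
      · exact Or.inl h
      · exact Or.inr ⟨x, Or.inl rfl, h⟩
      · exact Or.inr ⟨z, Or.inr hz, hc⟩
    · rintro (h | ⟨z, (rfl | hz), hc⟩)
      · exact Or.inl (Or.inl h)
      · exact Or.inl (Or.inr hc)
      · exact Or.inr ⟨z, hz, hc⟩

-- A on a nonempty vary_words is the filter of range(32) by "stable for every word"
theorem measure_layer_cons (W_base : List Int) (n_rounds w0 : Int) (rest : List Int) :
    measure_layer W_base (w0 :: rest) n_rounds
      = (PySem.List.pyRange 0 32 1).filter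
          (fun bp => (w0 :: rest).all (fun w => stabB W_base n_rounds w bp)) := by
  unfold measure_layer
  show (match (rest.foldl
      (fun (acc : Option (List Int)) w_idx =>
        let s := measure_stable_bits W_base w_idx n_rounds
        match acc with
        | none => some s
        | some a => some (PySem.Set.inter a s))
      (some (measure_stable_bits W_base w0 n_rounds))) with
    | none => []
    | some a => if a = [] then [] else a)
    = (PySem.List.pyRange 0 32 1).filter
        (fun bp => (w0 :: rest).all (fun w => stabB W_base n_rounds w bp))
  rw [msb_eq_filter W_base w0 n_rounds]
  rw [interfold W_base n_rounds rest (stabB W_base n_rounds w0)]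
  show (if (PySem.List.pyRange 0 32 1).filter
        (fun bp => stabB W_base n_rounds w0 bp && rest.all (fun w => stabB W_base n_rounds w bp)) = []
      then []
      else (PySem.List.pyRange 0 32 1).filter
        (fun bp => stabB W_base n_rounds w0 bp && rest.all (fun w => stabB W_base n_rounds w bp)))
    = (PySem.List.pyRange 0 32 1).filter
        (fun bp => stabB W_base n_rounds w0 bp && rest.all (fun w => stabB W_base n_rounds w bp))
  split_ifs with h
  · exact h.symm
  · rfl

-- membership in B's accumulated set of varying bits
theorem mem_varying (W_base : List Int) (n_rounds : Int) (ws : List Int) (y : Int) :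
    y ∈ ws.foldl
      (fun (vy : PySem.Set Int) w =>
        let hashes := (PySem.List.pyRange 0 16 1).foldl
          (fun acc val => acc ++ [sha4 (PySem.List.pySetD W_base w val) n_rounds]) []
        let ref := PySem.List.pyGetD hashes 0 []
        (PySem.List.slice hashes (some 1) none).foldl
          (fun vy h =>
            (PySem.List.pyRange 0 32 1).foldl
              (fun vy bit_pos =>
                if bit_of h bit_pos != bit_of ref bit_pos then PySem.Set.add vy bit_pos else vy)
              vy)
          vy) []
    ↔ ∃ w ∈ ws, ∃ h ∈ (hashesFor W_base n_rounds w).tail,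
        y ∈ PySem.List.pyRange 0 32 1
        ∧ (bit_of h y != bit_of (PySem.List.pyGetD (hashesFor W_base n_rounds w) 0 []) y) = true := by
  have hstep : (fun (vy : PySem.Set Int) w =>
      let hashes := (PySem.List.pyRange 0 16 1).foldl
        (fun acc val => acc ++ [sha4 (PySem.List.pySetD W_base w val) n_rounds]) []
      let ref := PySem.List.pyGetD hashes 0 []
      (PySem.List.slice hashes (some 1) none).foldl
        (fun vy h =>
          (PySem.List.pyRange 0 32 1).foldl
            (fun vy bit_pos =>
              if bit_of h bit_pos != bit_of ref bit_pos then PySem.Set.add vy bit_pos else vy)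
            vy)
        vy)
    = (fun (vy : PySem.Set Int) w =>
      ((hashesFor W_base n_rounds w).tail).foldl
        (fun vy h =>
          (PySem.List.pyRange 0 32 1).foldl
            (fun vy bit_pos =>
              if bit_of h bit_pos != bit_of (PySem.List.pyGetD (hashesFor W_base n_rounds w) 0 []) bit_pos
              then PySem.Set.add vy bit_pos else vy)
            vy)
        vy) := by
    funext vy w
    show (PySem.List.slice (hashesFor W_base n_rounds w) (some 1) none).foldl _ vy = _
    rw [PySem.List.slice_from_one]
    rfl
  rw [hstep]
  rw [mem_foldl_of_step _
    (fun w y => ∃ h ∈ (hashesFor W_base n_rounds w).tail,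
      y ∈ PySem.List.pyRange 0 32 1
      ∧ (bit_of h y != bit_of (PySem.List.pyGetD (hashesFor W_base n_rounds w) 0 []) y) = true) y
    (fun s w => by
      rw [mem_foldl_of_step _
        (fun h y => y ∈ PySem.List.pyRange 0 32 1
          ∧ (bit_of h y != bit_of (PySem.List.pyGetD (hashesFor W_base n_rounds w) 0 []) y) = true) y
        (fun s h => mem_foldl_add_if _ _ s y) _ s]) ws []]
  simp

-- B on a nonempty vary_words is the complement (inside range(32)) of the union of varying bits
set_option maxHeartbeats 1000000 in
theorem alt_cons (W_base : List Int) (n_rounds w0 : Int) (rest : List Int) :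
    measure_layer_alt W_base (w0 :: rest) n_rounds
      = (PySem.List.pyRange 0 32 1).filter
          (fun bp => !decide (∃ w ∈ w0 :: rest, ∃ h ∈ (hashesFor W_base n_rounds w).tail,
            bp ∈ PySem.List.pyRange 0 32 1
            ∧ (bit_of h bp != bit_of (PySem.List.pyGetD (hashesFor W_base n_rounds w) 0 []) bp) = true)) := by
  unfold measure_layer_alt
  rw [if_neg (by simp)]
  show List.filter _ (PySem.Set.ofList (PySem.List.pyRange 0 32 1)) = _
  rw [PySem.Set.ofList_eq_self_of_nodup _ (PySem.List.nodup_pyRange_one 0 32)]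
  apply List.filter_congr
  intro bp _
  exact congrArg (fun b => !b)
    (by rw [Bool.eq_iff_iff, PySem.Set.contains_iff, decide_eq_true_eq]
        exact mem_varying W_base n_rounds (w0 :: rest) bp)

theorem measure_layer_spec : Claim_equal_measure_layer := by
  intro W_base vary_words n_rounds _ _
  unfold Spec_measure_layer
  cases vary_words with
  | nil => rfl
  | cons w0 rest =>
    rw [measure_layer_cons, alt_cons]
    apply List.filter_congr
    intro bp hbp
    rw [Bool.eq_iff_iff, List.all_eq_true]
    simp only [Bool.not_eq_true', decide_eq_false_iff_not]
    push_neg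
    constructor
    · intro hall w hw h hh _
      have := (stabB_iff W_base n_rounds w bp).1 (hall w hw) h hh
      simp [this]
    · intro hnone w hw
      rw [stabB_iff W_base n_rounds w bp]
      intro h hh
      have := hnone w hw h hh hbp
      simpa [bne_iff_ne] using this
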